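-- pv_equiv track=rewrite | github.com/huetran1611/ressupply_luyen | Function.py | has_duplicate_synchonize_point
-- ===== SOURCE A (Python) =====
-- def has_duplicate_synchonize_point(solution):
--     seen = set()
--     for route in solution[1]:
--         for item in route:
--             synchonize_point = item[0]
--             if synchonize_point in seen:
--                 return True
--             seen.add(synchonize_point)
--     return False
-- ===== SOURCE B (Python) =====
-- def has_duplicate_synchonize_point(solution):
--     points = sorted(item[0] for route in solution[1] for item in route)
--     return any(a == b for a, b in zip(points, points[1:]))
-- ===== Notes on version B (the rewrite author's own statement) =====
-- stated objective: alternative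
-- what changed: Replaced A's incremental seen-set membership loop with early return by a sort-then-scan algorithm: sort all synchronize points and check whether any two adjacent sorted points are equal.
import Mathlib
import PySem

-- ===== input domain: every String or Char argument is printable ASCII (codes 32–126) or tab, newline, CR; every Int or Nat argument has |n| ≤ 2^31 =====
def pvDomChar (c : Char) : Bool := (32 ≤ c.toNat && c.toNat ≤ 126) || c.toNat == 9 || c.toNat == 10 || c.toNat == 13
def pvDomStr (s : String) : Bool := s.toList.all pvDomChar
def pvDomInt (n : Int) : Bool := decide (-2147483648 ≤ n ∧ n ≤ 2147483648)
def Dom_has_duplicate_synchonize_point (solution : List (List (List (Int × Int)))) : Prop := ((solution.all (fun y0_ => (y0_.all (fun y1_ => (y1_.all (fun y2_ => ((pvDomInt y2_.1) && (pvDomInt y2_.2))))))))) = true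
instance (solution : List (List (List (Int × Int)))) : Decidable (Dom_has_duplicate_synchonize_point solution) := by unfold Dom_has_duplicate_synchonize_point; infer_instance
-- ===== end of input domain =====

-- B sorts the flattened synchronize points and reports a duplicate iff some two
-- adjacent sorted points are equal, instead of A's incremental seen-set with early return.

-- ===== PORT A =====
-- inner 'for item in route' loop; none = early 'return True'
def pvAinner (seen : PySem.Set Int) : List (Int × Int) → Option (PySem.Set Int)
  | [] => some seen
  | item :: rest =>
      let synchonize_point := item.1
      if PySem.Set.contains seen synchonize_point then none
      else pvAinner (PySem.Set.add seen synchonize_point) rest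

-- outer 'for route in solution[1]' loop
def pvAouter (seen : PySem.Set Int) : List (List (Int × Int)) → Bool
  | [] => false
  | route :: routes =>
      match pvAinner seen route with
      | none => true
      | some seen' => pvAouter seen' routes

def has_duplicate_synchonize_point (solution : List (List (List (Int × Int)))) : Bool :=
  pvAouter PySem.Set.empty ((PySem.List.pyGet? solution 1).getD [])

-- ===== PORT B =====
def has_duplicate_synchonize_point_alt (solution : List (List (List (Int × Int)))) : Bool :=
  let points := PySem.List.sorted
    (((PySem.List.pyGet? solution 1).getD []).flatMap (fun route => route.map (fun item => item.1)))
    (fun x => x) false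
  (points.zip points.tail).any (fun p => p.1 == p.2)

-- ===== PRECONDITION & SPEC =====
-- Pre_ excludes exactly the inputs where Python's 'solution[1]' raises IndexError.
def Pre_has_duplicate_synchonize_point (solution : List (List (List (Int × Int)))) : Prop :=
  2 ≤ solution.length
instance (solution : List (List (List (Int × Int)))) : Decidable (Pre_has_duplicate_synchonize_point solution) := by unfold Pre_has_duplicate_synchonize_point; infer_instance

def pvWitness_has_duplicate_synchonize_point : (List (List (List (Int × Int)))) :=
  [[], [[(1, 2)], [(2, 3), (1, 9)]]]

def Spec_has_duplicate_synchonize_point (solution : List (List (List (Int × Int)))) (out : Bool) : Prop := out = has_duplicate_synchonize_point_alt solution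
instance (solution : List (List (List (Int × Int)))) (out : Bool) : Decidable (Spec_has_duplicate_synchonize_point solution out) := by unfold Spec_has_duplicate_synchonize_point; infer_instance

-- ===== CLAIM (what is proved, stated in full; the proofs are below) =====
def Claim_equal_has_duplicate_synchonize_point : Prop := ∀ (solution : List (List (List (Int × Int)))), Dom_has_duplicate_synchonize_point solution → Pre_has_duplicate_synchonize_point solution → Spec_has_duplicate_synchonize_point solution (has_duplicate_synchonize_point solution)

-- ===== LEMMAS AND PROOFS =====

-- single-list early-return scan over the flattened points
def pvScan (seen : PySem.Set Int) : List Int → Bool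
  | [] => false
  | p :: rest =>
      if PySem.Set.contains seen p then true
      else pvScan (PySem.Set.add seen p) rest

theorem pvScan_char (l : List Int) : ∀ (seen : PySem.Set Int),
    pvScan seen l = !decide (l.Nodup ∧ ∀ x ∈ l, x ∉ seen) := by
  induction l with
  | nil => intro seen; simp [pvScan]
  | cons p rest ih =>
      intro seen
      simp only [pvScan]
      by_cases hp : p ∈ seen
      · simp [hp]
      · rw [if_neg (by simp [hp]), ih]
        congr 1
        rw [decide_eq_decide]
        simp only [List.nodup_cons, List.mem_cons, PySem.Set.mem_add]
        constructor
        · rintro ⟨hn, hall⟩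
          refine ⟨⟨fun hr => hall p hr (Or.inr rfl), hn⟩, ?_⟩
          rintro x (rfl | hx)
          · exact hp
          · exact fun hs => hall x hx (Or.inl hs)
        · rintro ⟨⟨hpr, hn⟩, hall⟩
          refine ⟨hn, fun x hx => ?_⟩
          rintro (hs | rfl)
          · exact hall x (Or.inr hx) hs
          · exact hpr hx

theorem pvAinner_scan (r : List (Int × Int)) : ∀ (seen : PySem.Set Int) (k : List Int),
    (match pvAinner seen r with
     | none => true
     | some s => pvScan s k) = pvScan seen (r.map (fun item => item.1) ++ k) := by
  induction r with
  | nil => intro seen k; simp [pvAinner]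
  | cons item rest ih =>
      intro seen k
      simp only [pvAinner, List.map_cons, List.cons_append, pvScan]
      by_cases hp : item.1 ∈ seen <;> simp [hp, ih]

theorem pvAouter_scan (rs : List (List (Int × Int))) : ∀ (seen : PySem.Set Int),
    pvAouter seen rs = pvScan seen (rs.flatMap (fun route => route.map (fun item => item.1))) := by
  induction rs with
  | nil => intro seen; simp [pvAouter, pvScan]
  | cons r rest ih =>
      intro seen
      simp only [pvAouter, List.flatMap_cons]
      rw [← pvAinner_scan]
      cases h : pvAinner seen r with
      | none => simp
      | some s => simp [ih]

-- on a (≤)-sorted list, some adjacent pair is equal iff the list has a duplicate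
theorem pvAdj_char (l : List Int) (hs : l.Pairwise (· ≤ ·)) :
    ((l.zip l.tail).any (fun p => p.1 == p.2)) = !decide l.Nodup := by
  induction l with
  | nil => simp
  | cons a rest ih =>
      cases rest with
      | nil => simp
      | cons b rest' =>
          have hab : a ≤ b := (List.pairwise_cons.mp hs).1 b (by simp)
          have hs' : (b :: rest').Pairwise (· ≤ ·) := (List.pairwise_cons.mp hs).2
          simp only [List.tail_cons, List.zip_cons_cons, List.any_cons]
          by_cases he : a = b
          · subst he
            simp [List.nodup_cons]
          · have ha : a ∉ b :: rest' := by
              intro hmem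
              rcases List.mem_cons.mp hmem with h | h
              · exact he h
              · have : b ≤ a := List.rel_of_pairwise_cons hs' h
                exact he (le_antisymm hab this)
            have : ((a == b) : Bool) = false := by simp [he]
            have hih := ih hs'
            simp only [List.tail_cons] at hih
            rw [this, Bool.false_or, hih]
            simp [List.nodup_cons, ha]

-- ===== VERDICT (by name: the statement is the Claim_ definition above) =====
theorem has_duplicate_synchonize_point_spec : Claim_equal_has_duplicate_synchonize_point := by
  intro solution _ _
  unfold Spec_has_duplicate_synchonize_point has_duplicate_synchonize_point has_duplicate_synchonize_point_alt
  set flat := ((PySem.List.pyGet? solution 1).getD []).flatMap (fun route => route.map (fun item => item.1)) with hflat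
  rw [pvAouter_scan, pvScan_char]
  rw [pvAdj_char _ (PySem.List.sorted_pairwise flat (fun x => x))]
  have hperm : (PySem.List.sorted flat (fun x => x) false).Perm flat :=
    PySem.List.sorted_perm flat (fun x => x) false
  rw [← hflat]
  simp [hperm.nodup_iff, PySem.Set.empty]
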